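-- pv_equiv track=rewrite | github.com/thehalleyyoung/halley-labs | refinement-type-inference-dynamic-lang/implementation/src/smt/stride_theory.py | stride_divides_shape
-- ===== SOURCE A (Python) =====
-- from functools import reduce
-- from operator import mul
-- from typing import Any, Dict, List, Optional, Tuple
--
-- def stride_divides_shape(
--     shape: Tuple[int, ...], strides: Tuple[int, ...]
-- ) -> bool:
--     """Check that each stride divides the product of trailing shape dims.
--
--     This is a necessary condition for a valid strided view.
--     """
--     if len(shape) != len(strides):
--         return False
--     n = len(shape)
--     for i in range(n):
--         trailing = reduce(mul, shape[i + 1 :], 1)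
--         if strides[i] != 0 and trailing % strides[i] != 0:
--             return False
--     return True
-- ===== SOURCE B (Python) =====
-- def stride_divides_shape(shape, strides):
--     """One backward pass: maintain the running suffix product instead of
--     recomputing reduce(mul, shape[i+1:]) for every i."""
--     if len(shape) != len(strides):
--         return False
--     suffix = 1
--     ok = True
--     for d, s in zip(reversed(shape), reversed(strides)):
--         ok = ok and (s == 0 or suffix % s == 0)
--         suffix *= d
--     return ok
-- ===== Notes on version B (the rewrite author's own statement) =====
-- stated objective: faster
-- what changed: Replaced the per-index recomputation of the trailing product (reduce over shape[i+1:] inside the loop) by a single backward pass that maintains a running suffix product.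
import Mathlib
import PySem

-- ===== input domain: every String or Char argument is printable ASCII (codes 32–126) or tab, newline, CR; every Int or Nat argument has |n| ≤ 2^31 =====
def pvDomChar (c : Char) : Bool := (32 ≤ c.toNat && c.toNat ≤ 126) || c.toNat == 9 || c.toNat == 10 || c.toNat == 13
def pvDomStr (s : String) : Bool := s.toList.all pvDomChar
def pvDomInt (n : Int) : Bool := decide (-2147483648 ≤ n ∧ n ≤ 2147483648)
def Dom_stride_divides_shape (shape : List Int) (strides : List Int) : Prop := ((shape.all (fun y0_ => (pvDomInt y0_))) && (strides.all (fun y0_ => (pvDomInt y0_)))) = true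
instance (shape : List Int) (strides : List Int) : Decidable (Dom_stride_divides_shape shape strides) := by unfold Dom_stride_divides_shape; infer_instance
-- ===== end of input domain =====

-- B replaces A's per-index reduce over shape[i+1:] by one backward pass with a running suffix product (O(n) instead of O(n^2)).

-- ===== PORT A =====
-- for i in range(n): trailing = reduce(mul, shape[i+1:], 1); early return False on failure.
-- strides[i] is always in range (i < n = len(strides)), so pyGetD is exact here.
def pvALoop (shape strides : List Int) (n i : Nat) : Bool :=
  if i < n then
    let trailing := (PySem.List.slice shape (some ((i : Int) + 1)) none).foldl (· * ·) 1
    let s := PySem.List.pyGetD strides (i : Int) 0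
    if s ≠ 0 ∧ PySem.Int.mod trailing s ≠ 0 then false
    else pvALoop shape strides n (i + 1)
  else true
termination_by n - i

def stride_divides_shape (shape : List Int) (strides : List Int) : Bool :=
  if shape.length ≠ strides.length then false
  else pvALoop shape strides shape.length 0

-- ===== PORT B =====
-- one step of B's loop over zip(reversed(shape), reversed(strides)): check against the suffix product, then extend it
def pvBStep (st : Int × Bool) (p : Int × Int) : Int × Bool :=
  (st.1 * p.1, st.2 && (p.2 == 0 || PySem.Int.mod st.1 p.2 == 0))

def stride_divides_shape_alt (shape : List Int) (strides : List Int) : Bool :=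
  if shape.length ≠ strides.length then false
  else ((shape.reverse.zip strides.reverse).foldl pvBStep (1, true)).2

-- ===== PRECONDITION & SPEC =====
def Spec_stride_divides_shape (shape : List Int) (strides : List Int) (out : Bool) : Prop := out = stride_divides_shape_alt shape strides
instance (shape : List Int) (strides : List Int) (out : Bool) : Decidable (Spec_stride_divides_shape shape strides out) := by unfold Spec_stride_divides_shape; infer_instance

-- ===== CLAIM (what is proved, stated in full; the proofs are below) =====
def Claim_equal_stride_divides_shape : Prop := ∀ (shape : List Int) (strides : List Int), Dom_stride_divides_shape shape strides → Spec_stride_divides_shape shape strides (stride_divides_shape shape strides)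

-- ===== LEMMAS AND PROOFS =====

-- common reference form: the conjunction of all checks, each against t * (product of the later dims)
def pvChk (t : Int) : List Int → List Int → Bool
  | _ :: ds, s :: ss => ((s == 0 || PySem.Int.mod (t * ds.prod) s == 0) && pvChk t ds ss)
  | _, _ => true

theorem pv_foldl_mul (l : List Int) (t : Int) : l.foldl (· * ·) t = t * l.prod := by
  induction l generalizing t with
  | nil => simp
  | cons d l ih => simp only [List.foldl_cons, ih, List.prod_cons]; ring

-- B's fold computes the suffix product in the first component and the conjunction of checks in the second
theorem pv_bfold (ds ss : List Int) (h : ds.length = ss.length) (t : Int) (b : Bool) :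
    (ds.reverse.zip ss.reverse).foldl pvBStep (t, b) = (t * ds.prod, b && pvChk t ds ss) := by
  induction ds generalizing ss b with
  | nil =>
    cases ss with
    | nil => simp [pvChk]
    | cons s ss => simp at h
  | cons d ds ih =>
    cases ss with
    | nil => simp at h
    | cons s ss =>
      simp only [List.length_cons, Nat.add_right_cancel_iff] at h
      have hz : (ds.reverse ++ [d]).zip (ss.reverse ++ [s]) = ds.reverse.zip ss.reverse ++ [(d, s)] := by
        rw [List.zip_append (by simp [h])]; rfl
      rw [List.reverse_cons, List.reverse_cons, hz, List.foldl_append, ih ss h b]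
      simp only [pvBStep, pvChk, List.prod_cons, List.foldl_cons, List.foldl_nil, Prod.mk.injEq]
      constructor
      · ring
      · cases b <;> cases pvChk t ds ss <;> simp [Bool.and_comm]

-- A's index loop equals the checks on the dropped suffixes
theorem pv_aloop (shape strides : List Int) (h : shape.length = strides.length) :
    ∀ k, pvALoop shape strides shape.length k = pvChk 1 (shape.drop k) (strides.drop k) := by
  intro k
  by_cases hk : k < shape.length
  · rw [pvALoop]
    have hk' : k < strides.length := h ▸ hk
    have hd1 : shape.drop k = shape[k] :: shape.drop (k + 1) := List.drop_eq_getElem_cons hk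
    have hd2 : strides.drop k = strides[k] :: strides.drop (k + 1) := List.drop_eq_getElem_cons hk'
    have hs : PySem.List.slice shape (some ((k : Int) + 1)) none = shape.drop (k + 1) := by
      have := PySem.List.slice_from shape (a := (k : Int) + 1) (by positivity)
      simpa using this
    have hg : PySem.List.pyGetD strides (k : Int) 0 = strides[k] := by
      rw [PySem.List.pyGetD_natCast]
      simp [List.getD, hk']
    have ih := pv_aloop shape strides h (k + 1)
    rw [hd1, hd2]
    simp only [hk, if_true, hs, hg, pv_foldl_mul, one_mul, pvChk, ih]
    by_cases hs0 : strides[k] = 0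
    · simp [hs0]
    · by_cases hm : PySem.Int.mod (List.drop (k + 1) shape).prod strides[k] = 0
      · simp [hs0, hm]
      · simp [hs0, hm]
  · rw [pvALoop]
    have h1 : shape.drop k = [] := List.drop_eq_nil_of_le (by omega)
    have h2 : strides.drop k = [] := List.drop_eq_nil_of_le (by omega)
    simp [hk, h1, h2, pvChk]
termination_by k => shape.length - k

-- ===== VERDICT (by name: the statement is the Claim_ definition above) =====
theorem stride_divides_shape_spec : Claim_equal_stride_divides_shape := by
  intro shape strides _
  unfold Spec_stride_divides_shape stride_divides_shape stride_divides_shape_alt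
  by_cases h : shape.length = strides.length
  · have hne : ¬(shape.length ≠ strides.length) := by simp [h]
    rw [if_neg hne, if_neg hne, pv_bfold shape strides h 1 true, pv_aloop shape strides h 0]
    simp
  · simp [h]
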